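-- pv_equiv track=rewrite | github.com/Lunedor/cadre-player | player_window.py | _canonicalize_mpv_key
-- ===== SOURCE A (Python) =====
-- def _canonicalize_mpv_key(key_name: str) -> str:
--     text = str(key_name or "").strip()
--     if not text:
--         return ""
--     parts = [p for p in text.split("+") if p]
--     if not parts:
--         return ""
--     mods = []
--     base = parts[-1]
--     if len(base) > 1:
--         base = base.lower()
--     mod_order = {"ctrl": 0, "alt": 1, "shift": 2, "meta": 3}
--     for p in parts[:-1]:
--         low = p.strip().lower()
--         if low in mod_order and low not in mods:
--             mods.append(low)
--     mods.sort(key=lambda m: mod_order[m])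
--     return "+".join(mods + [base])
-- ===== SOURCE B (Python) =====
-- def _canonicalize_mpv_key(key_name: str) -> str:
--     text = str(key_name or "").strip()
--     if not text:
--         return ""
--     parts = [p for p in text.split("+") if p]
--     if not parts:
--         return ""
--     prefix = parts[:-1]
--     base = parts[-1]
--     if len(base) > 1:
--         base = base.lower()
--     out = ""
--     for m in ("ctrl", "alt", "shift", "meta"):
--         if any(p.strip().lower() == m for p in prefix):
--             out += m + "+"
--     return out + base
-- ===== Notes on version B (the rewrite author's own statement) =====
-- stated objective: alternative
-- what changed: A accumulates a deduplicated list of seen modifiers and sorts it by a rank dict before joining; B keeps no modifier collection at all: it walks the fixed sequence ctrl,alt,shift,meta and for each one scans the prefix parts with any() for a match, appending 'mod+' directly to the output string, then appends the base (no dedup list, no set, no sort, no join).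
import Mathlib
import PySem

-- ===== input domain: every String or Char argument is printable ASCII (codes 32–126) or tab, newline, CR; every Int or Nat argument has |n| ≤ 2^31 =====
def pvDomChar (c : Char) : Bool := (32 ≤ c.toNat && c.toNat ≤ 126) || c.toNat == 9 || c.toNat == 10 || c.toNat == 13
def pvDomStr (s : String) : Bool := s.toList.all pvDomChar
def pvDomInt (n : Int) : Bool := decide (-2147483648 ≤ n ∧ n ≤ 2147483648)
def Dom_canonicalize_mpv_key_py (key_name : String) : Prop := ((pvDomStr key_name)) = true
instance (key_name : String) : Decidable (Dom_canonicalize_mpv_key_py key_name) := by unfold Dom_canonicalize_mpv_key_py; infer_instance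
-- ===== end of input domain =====

-- B drops A's dedup-list + rank-sort + join entirely: it scans the prefix parts once per
-- canonical modifier (any-match in the fixed order ctrl,alt,shift,meta) and builds the output
-- string directly by concatenation (alternative decomposition; same practical cost).


-- ===== PORT A =====
-- literal port of A: dedup list of modifiers, then sort by the mod_order dict, then join
def pvModOrder : PySem.Dict (List Char) Int :=
  ((((PySem.Dict.empty.insert "ctrl".toList 0).insert "alt".toList 1).insert
    "shift".toList 2).insert "meta".toList 3)

def canonicalize_mpv_key_py (key_name : String) : String :=
  let text := PySem.Chars.strip key_name.toList
  if text = [] then "" else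
  let parts := (PySem.Chars.splitOn text ['+']).filter (fun p => !p.isEmpty)
  if parts = [] then "" else
  -- parts[-1]: parts ≠ [] here, so pyGet? is some; .getD [] only discharges the Option
  let base0 := (PySem.List.pyGet? parts (-1)).getD []
  let base := if base0.length > 1 then PySem.Chars.lower base0 else base0
  let mods := (PySem.List.slice parts none (some (-1))).foldl
    (fun mods p =>
      let low := PySem.Chars.lower (PySem.Chars.strip p)
      if pvModOrder.contains low && !(mods.contains low) then mods ++ [low] else mods) []
  let sortedMods := PySem.List.sorted mods (fun m => pvModOrder.getD m 0) false
  String.ofList (PySem.Chars.join ['+'] (sortedMods ++ [base]))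

-- ===== PORT B =====
-- port of B: for each modifier of the fixed order, an any() scan of the prefix;
-- the output chars are built by direct concatenation, no sort and no join
def pvCanonOrder : List (List Char) :=
  ["ctrl".toList, "alt".toList, "shift".toList, "meta".toList]

def canonicalize_mpv_key_py_alt (key_name : String) : String :=
  let text := PySem.Chars.strip key_name.toList
  if text = [] then "" else
  let parts := (PySem.Chars.splitOn text ['+']).filter (fun p => !p.isEmpty)
  if parts = [] then "" else
  let pfx := PySem.List.slice parts none (some (-1))
  let base0 := (PySem.List.pyGet? parts (-1)).getD []
  let base := if base0.length > 1 then PySem.Chars.lower base0 else base0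
  let out := pvCanonOrder.foldl (fun out m =>
      if pfx.any (fun p => PySem.Chars.lower (PySem.Chars.strip p) == m)
      then out ++ m ++ ['+'] else out) []
  String.ofList (out ++ base)

-- ===== PRECONDITION & SPEC =====
def Spec_canonicalize_mpv_key_py (key_name : String) (out : String) : Prop := out = canonicalize_mpv_key_py_alt key_name
instance (key_name : String) (out : String) : Decidable (Spec_canonicalize_mpv_key_py key_name out) := by unfold Spec_canonicalize_mpv_key_py; infer_instance

-- ===== CLAIM (what is proved, stated in full; the proofs are below) =====
def Claim_equal_canonicalize_mpv_key_py : Prop := ∀ (key_name : String), Dom_canonicalize_mpv_key_py key_name → Spec_canonicalize_mpv_key_py key_name (canonicalize_mpv_key_py key_name)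

-- ===== LEMMAS AND PROOFS =====

lemma pv_contains_eq (low : List Char) :
    pvModOrder.contains low = pvCanonOrder.contains low := by
  by_cases h1 : low = ['c','t','r','l'] <;> by_cases h2 : low = ['a','l','t'] <;>
    by_cases h3 : low = ['s','h','i','f','t'] <;> by_cases h4 : low = ['m','e','t','a'] <;>
    simp [pvModOrder, pvCanonOrder, PySem.Dict.contains_insert, PySem.Dict.contains_empty,
      List.contains_eq_mem, h1, h2, h3, h4]

-- characterisation of A's dedup-accumulation loop: membership
lemma pv_mem_fold (L : List (List Char)) (acc : List (List Char)) (m : List Char) :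
    m ∈ L.foldl (fun mods p =>
      let low := PySem.Chars.lower (PySem.Chars.strip p)
      if pvModOrder.contains low && !(mods.contains low) then mods ++ [low] else mods) acc ↔
    m ∈ acc ∨ (m ∈ pvCanonOrder ∧ ∃ p ∈ L, PySem.Chars.lower (PySem.Chars.strip p) = m) := by
  induction L generalizing acc with
  | nil => simp
  | cons x L ih =>
    simp only [List.foldl_cons, ih]
    by_cases hc : (pvModOrder.contains (PySem.Chars.lower (PySem.Chars.strip x)) &&
        !(acc.contains (PySem.Chars.lower (PySem.Chars.strip x)))) = true
    · rw [if_pos hc]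
      have hcanon : PySem.Chars.lower (PySem.Chars.strip x) ∈ pvCanonOrder := by
        have := ((Bool.and_eq_true _ _).mp hc).1
        rw [pv_contains_eq] at this
        simpa [List.contains_eq_mem] using this
      constructor
      · rintro (h | ⟨hm, p, hp, hlow⟩)
        · rcases List.mem_append.mp h with h | h
          · exact Or.inl h
          · simp only [List.mem_singleton] at h
            exact Or.inr ⟨by rw [h]; exact hcanon, x, by simp, h.symm⟩
        · exact Or.inr ⟨hm, p, List.mem_cons_of_mem _ hp, hlow⟩
      · rintro (h | ⟨hm, p, hp, hlow⟩)
        · exact Or.inl (List.mem_append_left _ h)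
        · rcases List.mem_cons.mp hp with rfl | hp
          · exact Or.inl (List.mem_append_right _ (by simp [hlow]))
          · exact Or.inr ⟨hm, p, hp, hlow⟩
    · rw [if_neg hc]
      by_cases hcl : pvModOrder.contains (PySem.Chars.lower (PySem.Chars.strip x)) = true
      · -- then acc already contains low
        have hacc : PySem.Chars.lower (PySem.Chars.strip x) ∈ acc := by
          rcases Bool.and_eq_false_iff.mp (Bool.not_eq_true _ |>.mp hc) with h | h
          · exact absurd h (by simp [hcl])
          · simpa [List.contains_eq_mem] using h
        constructor
        · rintro (h | ⟨hm, p, hp, hlow⟩)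
          · exact Or.inl h
          · exact Or.inr ⟨hm, p, List.mem_cons_of_mem _ hp, hlow⟩
        · rintro (h | ⟨hm, p, hp, hlow⟩)
          · exact Or.inl h
          · rcases List.mem_cons.mp hp with rfl | hp
            · exact Or.inl (hlow ▸ hacc)
            · exact Or.inr ⟨hm, p, hp, hlow⟩
      · -- low not a modifier: x contributes nothing
        have hnc : PySem.Chars.lower (PySem.Chars.strip x) ∉ pvCanonOrder := by
          rw [pv_contains_eq] at hcl
          simpa [List.contains_eq_mem] using hcl
        constructor
        · rintro (h | ⟨hm, p, hp, hlow⟩)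
          · exact Or.inl h
          · exact Or.inr ⟨hm, p, List.mem_cons_of_mem _ hp, hlow⟩
        · rintro (h | ⟨hm, p, hp, hlow⟩)
          · exact Or.inl h
          · rcases List.mem_cons.mp hp with rfl | hp
            · exact absurd (hlow ▸ hm) hnc
            · exact Or.inr ⟨hm, p, hp, hlow⟩

-- characterisation of A's dedup-accumulation loop: no duplicates
lemma pv_nodup_fold (L : List (List Char)) (acc : List (List Char)) (h : acc.Nodup) :
    (L.foldl (fun mods p =>
      let low := PySem.Chars.lower (PySem.Chars.strip p)
      if pvModOrder.contains low && !(mods.contains low) then mods ++ [low] else mods) acc).Nodup := by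
  induction L generalizing acc with
  | nil => exact h
  | cons x L ih =>
    simp only [List.foldl_cons]
    split_ifs with hc
    · refine ih _ ?_
      have hnm : PySem.Chars.lower (PySem.Chars.strip x) ∉ acc := by
        have := ((Bool.and_eq_true _ _).mp hc).2
        simpa [List.contains_eq_mem] using this
      rw [List.nodup_append]
      exact ⟨h, List.nodup_singleton _, by
        intro a ha b hb
        simp only [List.mem_singleton] at hb
        subst hb
        intro h
        exact hnm (h ▸ ha)⟩
    · exact ih _ h

-- A's sort of the collected modifiers equals the fixed-order filter by an any-scan of L
lemma pv_sorted_eq (L : List (List Char)) :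
    PySem.List.sorted
      (L.foldl (fun mods p =>
        let low := PySem.Chars.lower (PySem.Chars.strip p)
        if pvModOrder.contains low && !(mods.contains low) then mods ++ [low] else mods) [])
      (fun m => pvModOrder.getD m 0) false =
    pvCanonOrder.filter (fun m => L.any (fun p => PySem.Chars.lower (PySem.Chars.strip p) == m)) := by
  apply PySem.List.sorted_eq_of_perm_of_pairwise_lt
  · rw [List.perm_ext_iff_of_nodup (List.Nodup.filter _ (by decide))
      (pv_nodup_fold L [] List.nodup_nil)]
    intro a
    rw [pv_mem_fold, List.mem_filter]
    simp only [List.any_eq_true, beq_iff_eq]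
    tauto
  · have hc : List.Pairwise
        (fun a b => pvModOrder.getD a 0 < pvModOrder.getD b 0) pvCanonOrder := by decide
    exact List.Pairwise.sublist List.filter_sublist hc

-- generalise the accumulator of B's concatenation loop
lemma pv_foldl_concat_acc (l : List (List Char)) (acc : List Char) :
    l.foldl (fun out m => out ++ m ++ ['+']) acc =
      acc ++ l.foldl (fun out m => out ++ m ++ ['+']) [] := by
  induction l generalizing acc with
  | nil => simp
  | cons x l ih => simp only [List.foldl_cons, List.nil_append]; rw [ih, ih (x ++ ['+'])]; simp

-- '+'.join(l ++ [base]) built by concatenation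
lemma pv_join_eq_concat (l : List (List Char)) (base : List Char) :
    PySem.Chars.join ['+'] (l ++ [base]) =
      l.foldl (fun out m => out ++ m ++ ['+']) [] ++ base := by
  induction l with
  | nil => simp [PySem.Chars.join_singleton]
  | cons x l ih =>
    have : PySem.Chars.join ['+'] (x :: (l ++ [base])) =
        x ++ ['+'] ++ PySem.Chars.join ['+'] (l ++ [base]) := by
      cases l <;> simp [PySem.Chars.join_cons_cons, List.append_assoc]
    simp only [List.cons_append, this, ih, List.foldl_cons, List.nil_append]
    rw [pv_foldl_concat_acc]; simp

-- ===== VERDICT (by name: the statement is the Claim_ definition above) =====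
theorem canonicalize_mpv_key_py_spec : Claim_equal_canonicalize_mpv_key_py := by
  intro key _
  unfold Spec_canonicalize_mpv_key_py
  simp only [canonicalize_mpv_key_py, canonicalize_mpv_key_py_alt]
  by_cases ht : PySem.Chars.strip key.toList = []
  · simp [ht]
  · simp only [if_neg ht]
    by_cases hp : (PySem.Chars.splitOn (PySem.Chars.strip key.toList) ['+']).filter
        (fun p => !p.isEmpty) = []
    · simp [hp]
    · simp only [if_neg hp]
      rw [pv_sorted_eq, pv_join_eq_concat, PySem.List.foldl_if_eq_foldl_filter]
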